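-- pv_equiv track=rewrite | github.com/EthanXC/PokerBot | pokerbot/games/leduc.py | _folder
-- ===== SOURCE A (Python) =====
-- def _folder(history: str) -> int:
--     """Return the player who folded. Assumes 'f' in history."""
--     actor = 0
--     for ch in history:
--         if ch == "/":
--             actor = 0
--             continue
--         if ch == "f":
--             return actor
--         actor = 1 - actor
--     raise ValueError("No fold in history")
-- ===== SOURCE B (Python) =====
-- def _folder(history: str) -> int:
--     """Return the player who folded. Assumes 'f' in history."""
--     i = history.index("f")          # raises ValueError when no fold, like A
--     seg = history[:i]
--     j = seg.rfind("/")
--     return (len(seg) - j - 1) % 2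
-- ===== Notes on version B (the rewrite author's own statement) =====
-- stated objective: simpler
-- what changed: Replaces the char-by-char toggled actor accumulator with a locate-then-parity computation: find the first 'f', cut the prefix, and take the parity of the number of characters after the last '/' in it.
import Mathlib
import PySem

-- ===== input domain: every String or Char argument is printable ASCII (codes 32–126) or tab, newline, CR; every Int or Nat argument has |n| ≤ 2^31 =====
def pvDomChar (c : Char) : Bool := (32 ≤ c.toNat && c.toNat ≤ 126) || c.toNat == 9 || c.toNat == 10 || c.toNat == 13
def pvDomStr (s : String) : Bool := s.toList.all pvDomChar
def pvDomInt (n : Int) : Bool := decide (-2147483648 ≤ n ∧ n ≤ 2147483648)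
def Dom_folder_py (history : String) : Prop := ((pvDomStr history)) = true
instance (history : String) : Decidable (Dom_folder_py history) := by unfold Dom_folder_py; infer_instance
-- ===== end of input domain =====

-- B replaces A's char-by-char toggled actor accumulator with locate-then-parity
-- (first 'f', last '/' before it, parity of the distance); objective: simpler.

-- ===== PORT A =====
-- A's for-loop with early return and a final raise: Option Int, none = the ValueError path.
def folderLoop : List Char → Int → Option Int
  | [], _ => none
  | c :: cs, actor =>
      if c = '/' then folderLoop cs 0
      else if c = 'f' then some actor
      else folderLoop cs (1 - actor)

def folder_py (history : String) : Int := (folderLoop history.toList 0).getD 0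

-- ===== PORT B =====
-- history.index('f') ported as PySem.Str.find: on Pre_ (a fold exists) index = find;
-- where no 'f' exists both Pythons raise ValueError and the input is outside Pre_.
def folder_py_alt (history : String) : Int :=
  let i := PySem.Str.find history "f"
  let seg := PySem.Str.slice history none (some i)
  let j := PySem.Str.rfind seg "/"
  PySem.Int.mod (PySem.Str.len seg - j - 1) 2

-- ===== PRECONDITION & SPEC =====
-- A raises ValueError when the history contains no 'f' (and so does B's .index): excluded.
def Pre_folder_py (history : String) : Prop := 'f' ∈ history.toList
instance (history : String) : Decidable (Pre_folder_py history) := by unfold Pre_folder_py; infer_instance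
def pvWitness_folder_py : String := "crc/crf"

def Spec_folder_py (history : String) (out : Int) : Prop := out = folder_py_alt history
instance (history : String) (out : Int) : Decidable (Spec_folder_py history out) := by unfold Spec_folder_py; infer_instance

-- ===== CLAIM (what is proved, stated in full; the proofs are below) =====
def Claim_equal_folder_py : Prop := ∀ (history : String), Dom_folder_py history → Pre_folder_py history → Spec_folder_py history (folder_py history)

-- ===== LEMMAS AND PROOFS =====

theorem singleton_isPrefixOf_iff (c : Char) (l : List Char) :
    [c].isPrefixOf l = true ↔ l[0]? = some c := by
  cases l with
  | nil => simp [List.isPrefixOf]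
  | cons x xs => simp [List.isPrefixOf]; exact eq_comm

-- first occurrence index = length of the (· != c)-takeWhile
theorem takeWhile_first (c : Char) (l : List Char) (h : c ∈ l) :
    l[(l.takeWhile (· != c)).length]? = some c ∧
      ∀ i < (l.takeWhile (· != c)).length, l[i]? ≠ some c := by
  induction l with
  | nil => cases h
  | cons x xs ih =>
    by_cases hx : x = c
    · subst hx; simp
    · have hmem : c ∈ xs := by
        rcases List.mem_cons.mp h with h' | h'
        · exact absurd h'.symm hx
        · exact h'
      have ih' := ih hmem
      have ht : (x :: xs).takeWhile (· != c) = x :: xs.takeWhile (· != c) := by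
        simp [hx]
      rw [ht]
      constructor
      · simpa using ih'.1
      · intro i hi
        cases i with
        | zero =>
          simp only [List.getElem?_cons_zero, ne_eq, Option.some.injEq]
          exact fun hc => hx hc
        | succ i' =>
          simp only [List.getElem?_cons_succ]
          exact ih'.2 i' (by simpa using hi)

theorem rfind_go_char (c : Char) (s : List Char) : ∀ n : Nat,
    PySem.Chars.rfind.go s [c] n =
      if ∃ j, j ≤ n ∧ s[j]? = some c then
        ((Nat.findGreatest (fun j => s[j]? = some c) n : Nat) : Int)
      else -1 := by
  intro n
  induction n with
  | zero =>
    simp only [PySem.Chars.rfind.go, singleton_isPrefixOf_iff]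
    by_cases h : s[0]? = some c
    · simp [h, Nat.findGreatest]
    · simp [h]
  | succ n ih =>
    have hdrop : ([c].isPrefixOf (s.drop (n + 1)) = true) ↔ s[n + 1]? = some c := by
      rw [singleton_isPrefixOf_iff]
      simp [List.getElem?_drop]
    simp only [PySem.Chars.rfind.go] at *
    by_cases h : s[n + 1]? = some c
    · rw [if_pos (hdrop.mpr h)]
      rw [if_pos ⟨n + 1, le_refl _, h⟩]
      rw [Nat.findGreatest_succ]
      simp [h]
    · rw [if_neg (by simp [hdrop, h])]
      rw [ih]
      have hiff : (∃ j, j ≤ n + 1 ∧ s[j]? = some c) ↔ (∃ j, j ≤ n ∧ s[j]? = some c) := by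
        constructor
        · rintro ⟨j, hj, hje⟩
          rcases Nat.lt_or_ge j (n + 1) with hlt | hge
          · exact ⟨j, Nat.lt_succ_iff.mp hlt, hje⟩
          · exact absurd hje (by have : j = n + 1 := le_antisymm hj hge; simp [this, h])
        · rintro ⟨j, hj, hje⟩; exact ⟨j, Nat.le_succ_of_le hj, hje⟩
      rw [Nat.findGreatest_succ, if_neg h]
      by_cases hex : ∃ j, j ≤ n ∧ s[j]? = some c
      · rw [if_pos (hiff.mpr hex), if_pos hex]
      · rw [if_neg (fun hc => hex (hiff.mp hc)), if_neg hex]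

theorem rfind_char (c : Char) (s : List Char) :
    PySem.Chars.rfind s [c] =
      (s.length : Int) - ((s.reverse.takeWhile (· != c)).length : Int) - 1 := by
  rw [show PySem.Chars.rfind s [c] = PySem.Chars.rfind.go s [c] s.length from rfl,
      rfind_go_char]
  by_cases hmem : c ∈ s
  · have hrev : c ∈ s.reverse := by simpa using hmem
    set k := (s.reverse.takeWhile (· != c)).length with hk
    obtain ⟨hkget, hkmin⟩ := takeWhile_first c s.reverse hrev
    have hklt : k < s.length := by
      have := (List.getElem?_eq_some_iff.mp hkget).choose
      simpa using this
    have hj0 : s[s.length - 1 - k]? = some c := by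
      rw [List.getElem?_reverse (by simpa using hklt)] at hkget
      exact hkget
    have hmax : ∀ j, s[j]? = some c → j ≤ s.length - 1 - k := by
      intro j hj
      have hjlt : j < s.length := (List.getElem?_eq_some_iff.mp hj).choose
      by_contra hgt
      have hlt : s.length - 1 - j < k := by omega
      have hrj : s.reverse[s.length - 1 - j]? = some c := by
        rw [List.getElem?_reverse (by omega)]
        have heq : s.length - 1 - (s.length - 1 - j) = j := by omega
        rw [heq]; exact hj
      exact hkmin _ hlt hrj
    have hle : s.length - 1 - k ≤ s.length := by omega
    have hfg : Nat.findGreatest (fun j => s[j]? = some c) s.length = s.length - 1 - k := by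
      have h1 : s.length - 1 - k ≤ Nat.findGreatest (fun j => s[j]? = some c) s.length :=
        Nat.le_findGreatest hle hj0
      have h2 : Nat.findGreatest (fun j => s[j]? = some c) s.length ≤ s.length - 1 - k :=
        hmax _ (Nat.findGreatest_spec (P := fun j => s[j]? = some c) hle hj0)
      omega
    rw [if_pos ⟨s.length - 1 - k, hle, hj0⟩, hfg]
    have : ((s.length - 1 - k : Nat) : Int) = (s.length : Int) - 1 - k := by
      omega
    rw [this]; ring
  · have hnone : ∀ j : Nat, s[j]? ≠ some c := by
      intro j hj
      exact hmem (List.mem_of_getElem? hj)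
    rw [if_neg (by rintro ⟨j, _, hj⟩; exact hnone j hj)]
    have hself : s.reverse.takeWhile (· != c) = s.reverse := by
      rw [List.takeWhile_eq_self_iff]
      intro x hx
      simp only [bne_iff_ne, ne_eq]
      intro hxc; subst hxc; exact hmem (by simpa using hx)
    rw [hself, List.length_reverse]
    ring

theorem take_eq_takeWhile (c : Char) : ∀ (l : List Char) (i : Nat),
    l[i]? = some c → (∀ j < i, l[j]? ≠ some c) →
    l.take i = l.takeWhile (· != c) := by
  intro l
  induction l with
  | nil => intro i hi _; simp at hi
  | cons x xs ih =>
    intro i hi hmin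
    cases i with
    | zero =>
      simp only [List.getElem?_cons_zero, Option.some.injEq] at hi
      subst hi; simp [List.takeWhile]
    | succ i' =>
      have hx : x ≠ c := by
        intro hxc; exact hmin 0 (Nat.succ_pos _) (by simp [hxc])
      have ht : (x :: xs).takeWhile (· != c) = x :: xs.takeWhile (· != c) := by
        simp [hx]
      rw [List.take_succ_cons, ht,
        ih i' (by simpa using hi) (fun (j : Nat) (hj : j < i') => by
          have h2 := hmin (j + 1) (by omega)
          simpa using h2)]

-- characterization of A's loop on histories that contain a fold
theorem folderLoop_spec : ∀ (cs : List Char) (a : Int), (a = 0 ∨ a = 1) → 'f' ∈ cs →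
    folderLoop cs a = some
      (((if '/' ∈ cs.takeWhile (· != 'f') then 0 else a) +
        (((cs.takeWhile (· != 'f')).reverse.takeWhile (· != '/')).length : Int)) % 2) := by
  intro cs
  induction cs with
  | nil => intro a _ h; cases h
  | cons c cs ih =>
    intro a ha hmem
    by_cases hf : c = 'f'
    · subst hf
      have e1 : folderLoop ('f' :: cs) a = some a := by
        simp [folderLoop]
      have h0 : List.takeWhile (· != 'f') ('f' :: cs) = [] := by
        rw [List.takeWhile_cons, if_neg (by decide)]
      rw [e1, h0]
      simp only [List.reverse_nil, List.takeWhile_nil, List.length_nil, Nat.cast_zero,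
        add_zero, List.not_mem_nil, if_false]
      rcases ha with h | h <;> subst h <;> norm_num
    · have hmem' : 'f' ∈ cs := by
        rcases List.mem_cons.mp hmem with h' | h'
        · exact absurd h'.symm hf
        · exact h'
      by_cases hs : c = '/'
      · subst hs
        have e1 : folderLoop ('/' :: cs) a = folderLoop cs 0 := by
          simp [folderLoop]
        rw [e1, ih 0 (Or.inl rfl) hmem']
        have hseg : List.takeWhile (· != 'f') ('/' :: cs) =
            '/' :: List.takeWhile (· != 'f') cs := by
          rw [List.takeWhile_cons, if_pos (by decide)]
        rw [hseg, if_pos List.mem_cons_self]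
        have hrev : ('/' :: List.takeWhile (· != 'f') cs).reverse =
            (List.takeWhile (· != 'f') cs).reverse ++ ['/'] := by simp
        rw [hrev, List.takeWhile_append, ite_self]
        split_ifs with hcond
        · simp [show List.takeWhile (· != '/') (['/'] : List Char) = [] from rfl, hcond]
        · rfl
      · -- c is neither '/' nor 'f'
        have e1 : folderLoop (c :: cs) a = folderLoop cs (1 - a) := by
          simp [folderLoop, hs, hf]
        have ha' : (1 - a = 0 ∨ 1 - a = 1) := by rcases ha with h | h <;> subst h <;> simp
        rw [e1, ih (1 - a) ha' hmem']
        have hseg : List.takeWhile (· != 'f') (c :: cs) =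
            c :: List.takeWhile (· != 'f') cs := by
          rw [List.takeWhile_cons, if_pos (by simp [hf])]
        rw [hseg]
        have hmm : (('/' : Char) ∈ c :: List.takeWhile (· != 'f') cs) ↔
            ('/' ∈ List.takeWhile (· != 'f') cs) := by
          constructor
          · intro h
            rcases List.mem_cons.mp h with h' | h'
            · exact absurd h'.symm hs
            · exact h'
          · exact fun h => List.mem_cons_of_mem _ h
        have hrev : (c :: List.takeWhile (· != 'f') cs).reverse =
            (List.takeWhile (· != 'f') cs).reverse ++ [c] := by simp
        rw [hrev, List.takeWhile_append]
        by_cases hin : '/' ∈ List.takeWhile (· != 'f') cs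
        · have hne : (List.takeWhile (· != '/') (List.takeWhile (· != 'f') cs).reverse).length ≠
              (List.takeWhile (· != 'f') cs).reverse.length := by
            intro hl
            have hself : List.takeWhile (· != '/') (List.takeWhile (· != 'f') cs).reverse =
                (List.takeWhile (· != 'f') cs).reverse :=
              (List.takeWhile_prefix _).eq_of_length hl
            have hmem2 : ('/' : Char) ∈ (List.takeWhile (· != 'f') cs).reverse := by
              simpa using hin
            have := List.takeWhile_eq_self_iff.mp hself '/' hmem2
            simp at this
          rw [if_neg hne, if_pos (hmm.mpr hin), if_pos hin]
        · have hall : ∀ x ∈ (List.takeWhile (· != 'f') cs).reverse, (x != '/') = true := by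
            intro x hx
            simp only [bne_iff_ne, ne_eq]
            intro hxc; subst hxc; exact hin (by simpa using hx)
          have hself : List.takeWhile (· != '/') (List.takeWhile (· != 'f') cs).reverse =
              (List.takeWhile (· != 'f') cs).reverse :=
            List.takeWhile_eq_self_iff.mpr hall
          have hlen : (List.takeWhile (· != '/') (List.takeWhile (· != 'f') cs).reverse).length =
              (List.takeWhile (· != 'f') cs).reverse.length := by rw [hself]
          rw [if_neg hin, if_neg (fun h => hin (hmm.mp h)), if_pos hlen, hself]
          have hc : List.takeWhile (· != '/') ([c] : List Char) = [c] := by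
            simp [hs]
          rw [hc]
          congr 1
          simp only [List.length_append, List.length_reverse, List.length_cons, List.length_nil]
          push_cast
          rcases ha with h | h <;> subst h <;> omega

-- ===== VERDICT (by name: the statement is the Claim_ definition above) =====
theorem folder_py_spec : Claim_equal_folder_py := by
  intro history _hdom hpre
  unfold Spec_folder_py
  unfold Pre_folder_py at hpre
  set cs := history.toList with hcs
  -- the shared quantities
  have hinf : ['f'] <:+: cs := by
    obtain ⟨s, t, hst⟩ := List.append_of_mem hpre
    exact ⟨s, t, by simp [hst]⟩
  have hfind : 0 ≤ PySem.Chars.find cs ['f'] := (PySem.Chars.find_nonneg_iff cs ['f']).mpr hinf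
  obtain ⟨hpref, hmin⟩ := PySem.Chars.find_spec hfind
  set i := (PySem.Chars.find cs ['f']).toNat with hi
  have hget : cs[i]? = some 'f' := by
    have := (singleton_isPrefixOf_iff 'f' (cs.drop i)).mp
      (by simpa [List.isPrefixOf_iff_prefix] using hpref)
    simpa [List.getElem?_drop] using this
  have hmin' : ∀ j < i, cs[j]? ≠ some 'f' := by
    intro j hj hjc
    exact hmin j hj (List.isPrefixOf_iff_prefix.mp
      ((singleton_isPrefixOf_iff 'f' (cs.drop j)).mpr
        (by simpa [List.getElem?_drop] using hjc)))
  have hseg : cs.take i = cs.takeWhile (· != 'f') := take_eq_takeWhile 'f' cs i hget hmin'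
  -- evaluate B
  have hB : folder_py_alt history =
      PySem.Int.mod ((((cs.takeWhile (· != 'f')).reverse.takeWhile (· != '/')).length : Int)) 2 := by
    show PySem.Int.mod _ _ = _
    have hlistF : ("f" : String).toList = ['f'] := rfl
    have hlistS : ("/" : String).toList = ['/'] := rfl
    rw [PySem.Str.rfind_eq]
    rw [PySem.Str.len_eq]
    rw [PySem.Str.toList_slice]
    rw [hlistS]
    rw [PySem.Chars.slice_eq_listSlice]
    rw [PySem.Str.find_eq]
    rw [hlistF]
    rw [← hcs]
    rw [PySem.List.slice_to _ hfind]
    rw [← hi]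
    rw [hseg]
    rw [rfind_char]
    congr 1
    ring
  rw [hB]
  -- evaluate A
  have hA := folderLoop_spec cs 0 (Or.inl rfl) hpre
  show (folderLoop cs 0).getD 0 = _
  rw [hA]
  rw [PySem.Int.mod_eq_emod_of_pos (by norm_num)]
  simp
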